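-- pv_equiv track=rewrite | github.com/pypi-data/pypi-mirror-398 | packages/PyserSSH/pyserssh-6.0.tar.gz/pyserssh-6.0/src/PyserSSH/system/sysfunc.py | text_centered_screen
-- ===== SOURCE A (Python) =====
-- def text_centered_screen(text, screen_width, screen_height, spacecharacter=" "):
--     screen = []
--     lines = text.split("\n")
--     padding_vertical = (screen_height - len(lines)) // 2  # Calculate vertical padding
--
--     for y in range(screen_height):
--         line = ""
--         if padding_vertical <= y < padding_vertical + len(lines):  # Check if it's within the range of the text lines
--             index = y - padding_vertical  # Get the corresponding line index
--             padding_horizontal = (screen_width - len(lines[index])) // 2  # Calculate horizontal padding for each line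
--             line += spacecharacter * padding_horizontal + lines[index] + spacecharacter * padding_horizontal
--         else:  # Fill other lines with space characters
--             line += spacecharacter * screen_width
--         screen.append(line)
--
--     return "\n".join(screen)
-- ===== SOURCE B (Python) =====
-- def text_centered_screen(text, screen_width, screen_height, spacecharacter=" "):
--     lines = text.split("\n")
--     padding_vertical = (screen_height - len(lines)) // 2
--     height = max(screen_height, 0)
--     screen = [spacecharacter * screen_width] * height if height > 0 else []
--     for index, line in enumerate(lines):
--         y = padding_vertical + index
--         if 0 <= y < height:
--             ph = (screen_width - len(line)) // 2
--             screen[y] = spacecharacter * ph + line + spacecharacter * ph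
--     return "\n".join(screen)
-- ===== Notes on version B (the rewrite author's own statement) =====
-- stated objective: alternative
-- what changed: A builds the screen row by row, branching inside a loop over range(screen_height); B builds a full list of filler rows first and then scatters the centered text lines onto it by index (fill-then-scatter), with an explicit 0<=y<height clipping guard.
import Mathlib
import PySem

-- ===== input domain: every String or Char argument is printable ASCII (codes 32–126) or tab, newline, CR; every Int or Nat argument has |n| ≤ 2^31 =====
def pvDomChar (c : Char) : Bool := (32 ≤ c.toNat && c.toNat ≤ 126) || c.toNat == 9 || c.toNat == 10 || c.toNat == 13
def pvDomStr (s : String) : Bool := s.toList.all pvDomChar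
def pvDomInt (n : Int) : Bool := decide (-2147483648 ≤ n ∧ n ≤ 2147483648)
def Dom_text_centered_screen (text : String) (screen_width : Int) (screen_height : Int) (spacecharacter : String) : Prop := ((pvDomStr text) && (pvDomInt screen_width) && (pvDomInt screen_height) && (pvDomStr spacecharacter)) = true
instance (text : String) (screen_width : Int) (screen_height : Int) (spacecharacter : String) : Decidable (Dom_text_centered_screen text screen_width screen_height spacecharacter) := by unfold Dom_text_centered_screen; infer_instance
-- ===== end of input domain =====

-- B replaces A's per-row branching loop over range(screen_height) by a fill-then-scatter
-- decomposition: build max(screen_height,0) filler rows, then overwrite the rows the text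
-- lines land on.  Objective: alternative decomposition, same asymptotic cost.

-- ===== PORT A =====
-- literal port of A: loop over range(screen_height); each iteration branches on whether
-- the row index lies in the vertical text window and appends the built row.

def text_centered_screen (text : String) (screen_width : Int) (screen_height : Int) (spacecharacter : String) : String :=
  let lines := PySem.Chars.splitOn text.toList ['\n']
  let padding_vertical := PySem.Int.floordiv (screen_height - (lines.length : Int)) 2
  let screen := (PySem.List.pyRange 0 screen_height 1).foldl (fun screen y =>
    let line : List Char :=
      if padding_vertical ≤ y ∧ y < padding_vertical + (lines.length : Int) then
        let l := PySem.List.pyGetD lines (y - padding_vertical) []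
        let padding_horizontal := PySem.Int.floordiv (screen_width - (l.length : Int)) 2
        PySem.List.pyRepeat spacecharacter.toList padding_horizontal ++ l
          ++ PySem.List.pyRepeat spacecharacter.toList padding_horizontal
      else
        PySem.List.pyRepeat spacecharacter.toList screen_width
    screen ++ [line]) ([] : List (List Char))
  String.ofList (PySem.Chars.join ['\n'] screen)

-- ===== PORT B =====
-- literal port of B (Source B): fill max(screen_height,0) filler rows, then scatter the
-- centered text lines onto them via enumerate with an in-range guard.
def text_centered_screen_alt (text : String) (screen_width : Int) (screen_height : Int) (spacecharacter : String) : String :=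
  let lines := PySem.Chars.splitOn text.toList ['\n']
  let padding_vertical := PySem.Int.floordiv (screen_height - (lines.length : Int)) 2
  let height := max screen_height 0
  let screen0 := if 0 < height then
    List.replicate height.toNat (PySem.List.pyRepeat spacecharacter.toList screen_width)
  else []
  let screen := (PySem.List.enumerate lines 0).foldl (fun scr p =>
    let y := padding_vertical + p.1
    if 0 ≤ y ∧ y < height then
      let ph := PySem.Int.floordiv (screen_width - (p.2.length : Int)) 2
      scr.set y.toNat (PySem.List.pyRepeat spacecharacter.toList ph ++ p.2
        ++ PySem.List.pyRepeat spacecharacter.toList ph)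
    else scr) screen0
  String.ofList (PySem.Chars.join ['\n'] screen)


-- ===== PRECONDITION & SPEC =====
def Spec_text_centered_screen (text : String) (screen_width : Int) (screen_height : Int) (spacecharacter : String) (out : String) : Prop := out = text_centered_screen_alt text screen_width screen_height spacecharacter
instance (text : String) (screen_width : Int) (screen_height : Int) (spacecharacter : String) (out : String) : Decidable (Spec_text_centered_screen text screen_width screen_height spacecharacter out) := by unfold Spec_text_centered_screen; infer_instance

-- ===== CLAIM (what is proved, stated in full; the proofs are below) =====
def Claim_equal_text_centered_screen : Prop := ∀ (text : String) (screen_width : Int) (screen_height : Int) (spacecharacter : String), Dom_text_centered_screen text screen_width screen_height spacecharacter → Spec_text_centered_screen text screen_width screen_height spacecharacter (text_centered_screen text screen_width screen_height spacecharacter)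

-- ===== LEMMAS AND PROOFS =====

-- B's scatter fold characterised: after scattering lines `ls` (enumerated from `k`) onto
-- `scr` (of length `height`), the length is unchanged and entry `j` is the centered row
-- `c ls[j-(pv+k)]` when `j` lies in the window `[pv+k, pv+k+len ls)`, the old entry otherwise.
theorem scatter_getD (height pv : Int) (c : List Char → List Char) :
    ∀ (ls : List (List Char)) (k : Int) (scr : List (List Char)),
    (scr.length : Int) = height →
    (((PySem.List.enumerate ls k).foldl (fun scr p =>
        if 0 ≤ pv + p.1 ∧ pv + p.1 < height then scr.set (pv + p.1).toNat (c p.2) else scr) scr).length = scr.length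
    ∧ ∀ (j : Nat), j < scr.length →
      ((PySem.List.enumerate ls k).foldl (fun scr p =>
        if 0 ≤ pv + p.1 ∧ pv + p.1 < height then scr.set (pv + p.1).toNat (c p.2) else scr) scr).getD j []
        = if pv + k ≤ (j : Int) ∧ (j : Int) < pv + k + ls.length then c (ls.getD (j - (pv + k)).toNat []) else scr.getD j []) := by
  intro ls
  induction ls with
  | nil =>
    intro k scr hlen
    refine ⟨by simp [PySem.List.enumerate_nil], ?_⟩
    intro j hj
    simp only [PySem.List.enumerate_nil, List.foldl_nil, List.length_nil]
    rw [if_neg (by push_cast [List.length_cons]; omega)]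
  | cons x xs ih =>
    intro k scr hlen
    rw [PySem.List.enumerate_cons, List.foldl_cons]
    set scr' := (if 0 ≤ pv + k ∧ pv + k < height then scr.set (pv + k).toNat (c x) else scr) with hscr'
    have hlen' : scr'.length = scr.length := by
      rw [hscr']; split <;> simp
    obtain ⟨ihl, ihg⟩ := ih (k + 1) scr' (by rw [hlen']; exact hlen)
    refine ⟨by rw [ihl, hlen'], ?_⟩
    intro j hj
    rw [ihg j (by omega)]
    by_cases hwin : pv + (k+1) ≤ (j : Int) ∧ (j : Int) < pv + (k+1) + xs.length
    · rw [if_pos hwin, if_pos (by push_cast [List.length_cons] at hwin ⊢; omega)]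
      have h1 : ((j : Int) - (pv + k)).toNat = ((j : Int) - (pv + (k+1))).toNat + 1 := by omega
      rw [h1]
      simp
    · rw [if_neg hwin]
      by_cases hj0 : (j : Int) = pv + k
      · -- j is exactly the row x lands on
        have hg : 0 ≤ pv + k ∧ pv + k < height := by constructor <;> omega
        rw [if_pos (by push_cast [List.length_cons]; omega)]
        have ht : (pv + k).toNat = j := by omega
        rw [hscr', if_pos hg, ht]
        have : ((j : Int) - (pv + k)).toNat = 0 := by omega
        rw [this]
        simp [List.getD, hj]
      · rw [if_neg (by push_cast [List.length_cons] at hwin ⊢; omega)]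
        rw [hscr']
        split
        · next hg =>
          have hne : (pv + k).toNat ≠ j := by omega
          by_cases hr : (pv+k).toNat < scr.length
          · rw [List.getD_eq_getElem _ _ (by simpa using hj), List.getD_eq_getElem _ _ hj,
              List.getElem_set_ne (by omega)]
          · rw [List.set_eq_of_length_le (by omega)]
        · rfl


theorem text_centered_screen_eq (text : String) (sw : Int) (sh : Int) (sc : String) :
    text_centered_screen text sw sh sc = text_centered_screen_alt text sw sh sc := by
  simp only [text_centered_screen, text_centered_screen_alt]
  congr 1
  congr 1
  set L := PySem.Chars.splitOn text.toList ['\n'] with hLdef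
  set pv := PySem.Int.floordiv (sh - (L.length : Int)) 2 with hpv
  set rep := PySem.List.pyRepeat sc.toList with hrep
  rw [show (if 0 < max sh 0 then List.replicate (max sh 0).toNat (rep sw) else []) =
      List.replicate (max sh 0).toNat (rep sw) from by
      by_cases hh : 0 < max sh 0
      · rw [if_pos hh]
      · rw [if_neg hh, show (max sh 0).toNat = 0 from by omega, List.replicate_zero]]
  set scr0 := List.replicate (max sh 0).toNat (rep sw) with hscr0
  have hsl : scr0.length = (max sh 0).toNat := by simp [hscr0]
  obtain ⟨hBl, hBg⟩ := scatter_getD (max sh 0) pv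
    (fun l => rep (PySem.Int.floordiv (sw - (l.length : Int)) 2) ++ l
      ++ rep (PySem.Int.floordiv (sw - (l.length : Int)) 2)) L 0 scr0
    (by rw [hsl]; omega)
  rw [PySem.List.foldl_append_singleton_eq_map, PySem.List.pyRange_one]
  simp only [List.map_map, List.nil_append]
  apply List.ext_getElem
  · rw [List.length_map, List.length_range, hBl, hsl]; omega
  · intro j hj1 hj2
    have hj2' : j < scr0.length := by rw [← hBl]; exact hj2
    rw [← List.getD_eq_getElem _ [] hj2, hBg j hj2']
    simp only [List.getElem_map, List.getElem_range, Function.comp_apply, zero_add, add_zero]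
    by_cases hw : pv ≤ (j : Int) ∧ (j : Int) < pv + (L.length : Int)
    · rw [if_pos hw, if_pos hw]
      rw [show (j : Int) - pv = (((j : Int) - pv).toNat : Int) from by omega,
        PySem.List.pyGetD_natCast]
      simp
      rw [max_eq_left (by omega)]
    · rw [if_neg hw, if_neg hw]
      rw [List.getD_eq_getElem _ [] hj2']
      simp [hscr0]

-- ===== VERDICT (by name: the statement is the Claim_ definition above) =====
theorem text_centered_screen_spec : Claim_equal_text_centered_screen := by
  intro text sw sh sc _
  unfold Spec_text_centered_screen
  exact text_centered_screen_eq text sw sh sc
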